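-- pv_equiv track=rewrite | github.com/miliar/Code_Jam_Webscraper | solutions_python/solutions_year17_round0_nr3/2078.py | solve
-- ===== SOURCE A (Python) =====
-- def solve(lst, K):
--     new_interval = None
--     for i in range(K):
--         _max_idx = lst.index(max(lst))
--         _max = lst[_max_idx]
--
--         if _max % 2 != 0:
--             new_interval = [(_max - 1) // 2] * 2
--         else:
--             new_interval = [_max // 2 - 1, _max // 2]
--
--         lst[_max_idx:_max_idx+1] = new_interval
--     new_interval.sort(reverse=True)
--     return ' '.join(list(map(str, new_interval)))
-- ===== SOURCE B (Python) =====
-- def _insert(s, x):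
--     # insert x into descending-sorted s, after any equal elements
--     i = 0
--     while i < len(s) and s[i] >= x:
--         i += 1
--     s.insert(i, x)
--
--
-- def solve(lst, K):
--     s = sorted(lst, reverse=True)
--     for _ in range(K - 1):
--         v = s.pop(0)
--         if v % 2 != 0:
--             a = b = (v - 1) // 2
--         else:
--             a, b = v // 2 - 1, v // 2
--         _insert(s, a)
--         _insert(s, b)
--     v = s[0]
--     if v % 2 != 0:
--         return f"{(v - 1) // 2} {(v - 1) // 2}"
--     return f"{v // 2} {v // 2 - 1}"
-- ===== Notes on version B (the rewrite author's own statement) =====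
-- stated objective: alternative
-- what changed: B keeps the intervals in a descending sorted list (pop the head max, insert the two halves in place) instead of A's per-iteration max()/index() scans and slice-assignment, and B computes only K-1 splits plus the final max, skipping A's final sort of the pair.
import Mathlib
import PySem

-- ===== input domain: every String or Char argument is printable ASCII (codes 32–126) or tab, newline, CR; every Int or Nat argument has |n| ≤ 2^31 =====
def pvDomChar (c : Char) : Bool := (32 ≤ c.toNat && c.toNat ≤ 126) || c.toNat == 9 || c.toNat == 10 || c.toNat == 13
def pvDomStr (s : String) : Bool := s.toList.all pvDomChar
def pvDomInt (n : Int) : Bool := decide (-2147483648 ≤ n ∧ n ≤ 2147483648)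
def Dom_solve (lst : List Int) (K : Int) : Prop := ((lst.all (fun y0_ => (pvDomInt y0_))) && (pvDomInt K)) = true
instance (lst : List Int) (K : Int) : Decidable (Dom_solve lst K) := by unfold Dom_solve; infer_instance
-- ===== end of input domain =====

-- B replaces A's repeated max()/index() scans over an unsorted list by a descending sorted
-- list: pop the head (the max), insert the two halves in order; only the return value is
-- compared (A mutates lst in place via slice assignment, B leaves its arguments untouched).

-- ===== PORT A =====
-- one iteration of A's loop; state = (lst, new_interval).
-- lst[i:i+1] = ni is ported as take i ++ ni ++ drop (i+1) (exact for 0 ≤ i < len lst,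
-- which holds since i comes from lst.index).
def stepA (st : List Int × List Int) : List Int × List Int :=
  match PySem.List.max? st.1 (fun x => x) with
  | none => st          -- max([]) raises ValueError; unreachable under Pre_
  | some m =>
    let i : Nat := (PySem.List.index? st.1 m).getD 0   -- index never fails: m ∈ lst
    let mx : Int := (PySem.List.pyGet? st.1 (i : Int)).getD 0   -- _max = lst[_max_idx]
    let ni : List Int :=
      if PySem.Int.mod mx 2 ≠ 0 then
        PySem.List.pyRepeat [PySem.Int.floordiv (mx - 1) 2] 2
      else
        [PySem.Int.floordiv mx 2 - 1, PySem.Int.floordiv mx 2]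
    (st.1.take i ++ ni ++ st.1.drop (i + 1), ni)

def solve (lst : List Int) (K : Int) : String :=
  let st := (PySem.List.pyRange 0 K).foldl (fun st _ => stepA st) (lst, [])
  PySem.Str.join " " ((PySem.List.sorted st.2 (fun x => x) true).map PySem.Int.toStr)

-- ===== PORT B =====
-- insert x into a descending-sorted list, after any equal elements (Source B's _insert)
def insDesc (x : Int) : List Int → List Int
  | [] => [x]
  | y :: ys => if x ≤ y then y :: insDesc x ys else x :: y :: ys

-- one iteration of Source B's loop on the descending list
def stepB (s : List Int) : List Int :=
  match s with
  | [] => []            -- s.pop(0) raises IndexError; unreachable under Pre_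
  | v :: rest =>
    let ab : Int × Int :=
      if PySem.Int.mod v 2 ≠ 0 then
        (PySem.Int.floordiv (v - 1) 2, PySem.Int.floordiv (v - 1) 2)
      else
        (PySem.Int.floordiv v 2 - 1, PySem.Int.floordiv v 2)
    insDesc ab.2 (insDesc ab.1 rest)

def solve_alt (lst : List Int) (K : Int) : String :=
  let s := (PySem.List.pyRange 0 (K - 1)).foldl (fun s _ => stepB s)
             (PySem.List.sorted lst (fun x => x) true)
  let v : Int := (PySem.List.pyGet? s 0).getD 0   -- v = s[0]
  let hl : Int × Int :=
    if PySem.Int.mod v 2 ≠ 0 then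
      (PySem.Int.floordiv (v - 1) 2, PySem.Int.floordiv (v - 1) 2)
    else
      (PySem.Int.floordiv v 2, PySem.Int.floordiv v 2 - 1)
  PySem.Str.join " " [PySem.Int.toStr hl.1, PySem.Int.toStr hl.2]

-- ===== PRECONDITION & SPEC =====
-- A raises on lst = [] (ValueError from max) and on K ≤ 0 (AttributeError: None.sort);
-- Pre_ excludes exactly those inputs.
def Pre_solve (lst : List Int) (K : Int) : Prop := lst ≠ [] ∧ 1 ≤ K
instance (lst : List Int) (K : Int) : Decidable (Pre_solve lst K) := by unfold Pre_solve; infer_instance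
def pvWitness_solve : List Int × Int := ([8], 1)

def Spec_solve (lst : List Int) (K : Int) (out : String) : Prop := out = solve_alt lst K
instance (lst : List Int) (K : Int) (out : String) : Decidable (Spec_solve lst K out) := by unfold Spec_solve; infer_instance

-- ===== CLAIM (what is proved, stated in full; the proofs are below) =====
def Claim_equal_solve : Prop := ∀ (lst : List Int) (K : Int), Dom_solve lst K → Pre_solve lst K → Spec_solve lst K (solve lst K)

-- ===== LEMMAS AND PROOFS =====

-- the two halves a max m is split into, as A lists them
def splitList (m : Int) : List Int :=
  if PySem.Int.mod m 2 ≠ 0 then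
    [PySem.Int.floordiv (m - 1) 2, PySem.Int.floordiv (m - 1) 2]
  else
    [PySem.Int.floordiv m 2 - 1, PySem.Int.floordiv m 2]

def iterA : Nat → List Int × List Int → List Int × List Int
  | 0, st => st
  | n + 1, st => iterA n (stepA st)

def iterB : Nat → List Int → List Int
  | 0, s => s
  | n + 1, s => iterB n (stepB s)

lemma foldl_const_stepA (l : List Int) (st : List Int × List Int) :
    l.foldl (fun st _ => stepA st) st = iterA l.length st := by
  induction l generalizing st with
  | nil => rfl
  | cons x xs ih => simpa [List.foldl, iterA] using ih (stepA st)

lemma foldl_const_stepB (l : List Int) (s : List Int) :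
    l.foldl (fun s _ => stepB s) s = iterB l.length s := by
  induction l generalizing s with
  | nil => rfl
  | cons x xs ih => simpa [List.foldl, iterB] using ih (stepB s)

lemma iterA_succ_right (n : Nat) (st : List Int × List Int) :
    iterA (n + 1) st = stepA (iterA n st) := by
  induction n generalizing st with
  | zero => rfl
  | succ n ih => exact ih (stepA st)

lemma insDesc_perm (x : Int) (s : List Int) : (insDesc x s).Perm (x :: s) := by
  induction s with
  | nil => simp [insDesc]
  | cons y ys ih =>
    by_cases h : x ≤ y
    · simpa [insDesc, h] using ((ih.cons y).trans (List.Perm.swap x y ys))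
    · simp [insDesc, h]

lemma insDesc_sorted (x : Int) (s : List Int) (hs : s.Pairwise (· ≥ ·)) :
    (insDesc x s).Pairwise (· ≥ ·) := by
  induction s with
  | nil => simp [insDesc]
  | cons y ys ih =>
    rcases List.pairwise_cons.mp hs with ⟨hy, hys⟩
    by_cases h : x ≤ y
    · rw [insDesc, if_pos h]
      refine List.pairwise_cons.mpr ⟨?_, ih hys⟩
      intro z hz
      rcases List.mem_cons.mp ((insDesc_perm x ys).mem_iff.mp hz) with h1 | h1
      · omega
      · exact hy z h1
    · rw [insDesc, if_neg h]
      refine List.pairwise_cons.mpr ⟨?_, hs⟩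
      intro z hz
      rcases List.mem_cons.mp hz with h1 | h1
      · omega
      · have := hy z h1; omega

lemma insDesc_ne_nil (x : Int) (s : List Int) : insDesc x s ≠ [] := by
  cases s with
  | nil => simp [insDesc]
  | cons y ys => by_cases h : x ≤ y <;> simp [insDesc, h]

lemma stepB_cons (m : Int) (rest : List Int) :
    stepB (m :: rest) =
      insDesc ((splitList m).getD 1 0) (insDesc ((splitList m).getD 0 0) rest) := by
  by_cases h : PySem.Int.mod m 2 ≠ 0
  · rw [stepB, splitList, if_pos h, if_pos h]; rfl
  · rw [stepB, splitList, if_neg h, if_neg h]; rfl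

lemma stepB_perm (m : Int) (rest : List Int) :
    (stepB (m :: rest)).Perm (splitList m ++ rest) := by
  rw [stepB_cons]
  refine ((insDesc_perm _ _).trans ((insDesc_perm _ _).cons _)).trans ?_
  by_cases h : PySem.Int.mod m 2 ≠ 0
  · rw [splitList, if_pos h]; exact List.Perm.refl _
  · rw [splitList, if_neg h]
    exact List.Perm.swap _ _ rest

lemma stepB_sorted (m : Int) (rest : List Int) (hs : rest.Pairwise (· ≥ ·)) :
    (stepB (m :: rest)).Pairwise (· ≥ ·) := by
  rw [stepB_cons]; exact insDesc_sorted _ _ (insDesc_sorted _ _ hs)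

lemma stepB_ne_nil (m : Int) (rest : List Int) : stepB (m :: rest) ≠ [] := by
  rw [stepB_cons]; exact insDesc_ne_nil _ _

-- the max A finds in any permutation of a sorted-descending m :: rest is m itself
lemma max?_of_perm (aL : List Int) (m : Int) (rest : List Int)
    (hp : aL.Perm (m :: rest)) (hs : (m :: rest).Pairwise (· ≥ ·)) :
    PySem.List.max? aL (fun x => x) = some m := by
  have hne : aL ≠ [] := by
    intro h; subst h; exact (List.cons_ne_nil m rest) hp.nil_eq.symm
  obtain ⟨m', hm'⟩ : ∃ m', PySem.List.max? aL (fun x => x) = some m' := by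
    cases hmax : PySem.List.max? aL (fun x => x) with
    | none => exact absurd ((PySem.List.max?_eq_none_iff aL _).mp hmax) hne
    | some m' => exact ⟨m', rfl⟩
  have hmem : m' ∈ m :: rest := hp.mem_iff.mp (PySem.List.max?_mem hm')
  have hle : m ≤ m' := PySem.List.max?_isMax hm' m (hp.mem_iff.mpr (List.mem_cons_self))
  have hge : m' ≤ m := by
    rcases List.mem_cons.mp hmem with h | h
    · omega
    · exact (List.pairwise_cons.mp hs).1 m' h
  rw [hm', le_antisymm hge hle]

-- characterisation of one A-step against the sorted-descending view m :: rest
lemma stepA_char (aL ni : List Int) (m : Int) (rest : List Int)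
    (hp : aL.Perm (m :: rest)) (hs : (m :: rest).Pairwise (· ≥ ·)) :
    (stepA (aL, ni)).2 = splitList m ∧ ((stepA (aL, ni)).1).Perm (splitList m ++ rest) := by
  have hmax : PySem.List.max? aL (fun x => x) = some m := max?_of_perm aL m rest hp hs
  have hmem : m ∈ aL := hp.mem_iff.mpr (List.mem_cons_self)
  obtain ⟨i, hi⟩ : ∃ i, PySem.List.index? aL m = some i :=
    Option.isSome_iff_exists.mp ((PySem.List.index?_isSome_iff aL m).mpr hmem)
  obtain ⟨pre, suf, hsplit, hlen, -⟩ := (PySem.List.index?_eq_some_iff aL m i).mp hi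
  have hget : PySem.List.pyGet? aL (i : Int) = some m := by
    rw [hsplit, ← hlen]; exact PySem.List.pyGet?_append_length pre suf m
  have htake : aL.take i = pre := by rw [hsplit]; exact List.take_left' hlen
  have hdrop : aL.drop (i + 1) = suf := by
    rw [hsplit, show pre ++ m :: suf = (pre ++ [m]) ++ suf by simp]
    exact List.drop_left' (by simp [hlen])
  have hstep : stepA (aL, ni) = (pre ++ splitList m ++ suf, splitList m) := by
    by_cases hpar : PySem.Int.mod m 2 ≠ 0
    · simp only [stepA, hmax, hi, hget, Option.getD_some, htake, hdrop,
        splitList, if_pos hpar, PySem.List.pyRepeat_singleton]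
      rfl
    · simp only [stepA, hmax, hi, hget, Option.getD_some, htake, hdrop,
        splitList, if_neg hpar]
  rw [hstep]
  refine ⟨rfl, ?_⟩
  have h1 : aL.Perm (m :: (pre ++ suf)) := by rw [hsplit]; exact List.perm_middle
  have hrs : rest.Perm (pre ++ suf) := (hp.symm.trans h1).cons_inv
  refine List.perm_iff_count.mpr (fun x => ?_)
  have hc := hrs.count_eq x
  simp only [List.count_append] at *
  omega

-- the loop invariant: A's list stays a permutation of B's descending list
lemma inv (n : Nat) (aL ni s : List Int)
    (hp : aL.Perm s) (hs : s.Pairwise (· ≥ ·)) (hne : s ≠ []) :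
    ((iterA n (aL, ni)).1).Perm (iterB n s) ∧ (iterB n s).Pairwise (· ≥ ·) ∧ iterB n s ≠ [] := by
  induction n generalizing aL ni s with
  | zero => exact ⟨hp, hs, hne⟩
  | succ n ih =>
    obtain ⟨m, rest, rfl⟩ : ∃ m rest, s = m :: rest := by
      cases s with
      | nil => exact absurd rfl hne
      | cons m rest => exact ⟨m, rest, rfl⟩
    obtain ⟨-, hperm⟩ := stepA_char aL ni m rest hp hs
    have hstep : ((stepA (aL, ni)).1).Perm (stepB (m :: rest)) :=
      hperm.trans (stepB_perm m rest).symm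
    simpa [iterA, iterB] using
      ih (stepA (aL, ni)).1 (stepA (aL, ni)).2 (stepB (m :: rest)) hstep
        (stepB_sorted m rest (List.Pairwise.of_cons hs)) (stepB_ne_nil m rest)

-- sorting a two-element list in reverse
lemma sorted_desc_pair_le (a b : Int) (h : b ≤ a) :
    PySem.List.sorted [a, b] (fun x => x) true = [a, b] := by
  refine PySem.List.eq_of_perm_of_pairwise_le_of_injective (fun x : Int => -x)
    neg_injective (PySem.List.sorted_perm [a, b] (fun x => x) true) ?_ ?_
  · refine (PySem.List.sorted_pairwise_rev [a, b] (fun x => x)).imp ?_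
    intro x y hxy
    have h1 : y ≤ x := hxy
    show -x ≤ -y
    omega
  · refine List.pairwise_cons.mpr ⟨?_, List.pairwise_singleton _ _⟩
    intro z hz
    have hzb : z = b := by simpa using hz
    show -a ≤ -z
    omega

lemma sorted_desc_pair_lt (a b : Int) (h : a < b) :
    PySem.List.sorted [a, b] (fun x => x) true = [b, a] := by
  refine PySem.List.eq_of_perm_of_pairwise_le_of_injective (fun x : Int => -x)
    neg_injective
    ((PySem.List.sorted_perm [a, b] (fun x => x) true).trans (List.Perm.swap b a []))
    ?_ ?_
  · refine (PySem.List.sorted_pairwise_rev [a, b] (fun x => x)).imp ?_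
    intro x y hxy
    have h1 : y ≤ x := hxy
    show -x ≤ -y
    omega
  · refine List.pairwise_cons.mpr ⟨?_, List.pairwise_singleton _ _⟩
    intro z hz
    have hza : z = a := by simpa using hz
    show -b ≤ -z
    omega

-- ===== VERDICT (by name: the statement is the Claim_ definition above) =====
theorem solve_spec : Claim_equal_solve := by
  intro lst K _ hpre
  obtain ⟨hne, hK⟩ := hpre
  unfold Spec_solve solve solve_alt
  simp only [foldl_const_stepA, foldl_const_stepB, PySem.List.length_pyRange_one]
  obtain ⟨n, hn⟩ : ∃ n : Nat, (K - 0).toNat = n + 1 := ⟨(K - 1).toNat, by omega⟩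
  have hn' : (K - 1 - 0).toNat = n := by omega
  rw [hn, hn', iterA_succ_right]
  have hinv := inv n lst [] (PySem.List.sorted lst (fun x => x) true)
    (PySem.List.sorted_perm lst (fun x => x) true).symm
    (PySem.List.sorted_pairwise_rev lst (fun x => x))
    (by rw [Ne, PySem.List.sorted_eq_nil_iff]; exact hne)
  obtain ⟨hperm, hsort, hnil⟩ := hinv
  obtain ⟨m, rest, hmr⟩ : ∃ m rest, iterB n (PySem.List.sorted lst (fun x => x) true) = m :: rest := by
    cases h : iterB n (PySem.List.sorted lst (fun x => x) true) with
    | nil => exact absurd h hnil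
    | cons m rest => exact ⟨m, rest, rfl⟩
  rw [hmr] at hperm hsort
  obtain ⟨hni, -⟩ := stepA_char (iterA n (lst, [])).1 (iterA n (lst, [])).2 m rest hperm hsort
  have hni' : (stepA (iterA n (lst, []))).2 = splitList m := hni
  rw [hmr, hni', PySem.List.pyGet?_zero_cons, Option.getD_some]
  by_cases hpar : PySem.Int.mod m 2 ≠ 0
  · rw [splitList, if_pos hpar, if_pos hpar, sorted_desc_pair_le _ _ (le_refl _)]
    rfl
  · rw [splitList, if_neg hpar, if_neg hpar,
      sorted_desc_pair_lt _ _ (by omega)]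
    rfl
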